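-- pv_equiv track=rewrite | github.com/PeterKWIlliams/python-static-site-generator | src/block_markdown_helper.py | check_if_heading
-- ===== SOURCE A (Python) =====
-- def check_if_heading(markdown_block):
--     is_heading = False
--
--     if markdown_block.startswith("#"):
--         start = "#"
--         for i in range(1, 7):
--             if markdown_block.startswith(start + " "):
--                 is_heading = True
--                 break
--             elif markdown_block.startswith(start + "#"):
--                 start += "#"
--             else:
--                 break
--     return is_heading
-- ===== SOURCE B (Python) =====
-- def check_if_heading(markdown_block):
--     count = 0
--     for ch in markdown_block:
--         if ch != "#":
--             break
--         count += 1
--     return 1 <= count <= 6 and markdown_block[count:count + 1] == " "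
-- ===== Notes on version B (the rewrite author's own statement) =====
-- stated objective: simpler
-- what changed: B counts the leading hash characters in one scan and tests the count and the following character directly, instead of A's loop that grows a prefix string and re-runs startswith on it up to six times.
import Mathlib
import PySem

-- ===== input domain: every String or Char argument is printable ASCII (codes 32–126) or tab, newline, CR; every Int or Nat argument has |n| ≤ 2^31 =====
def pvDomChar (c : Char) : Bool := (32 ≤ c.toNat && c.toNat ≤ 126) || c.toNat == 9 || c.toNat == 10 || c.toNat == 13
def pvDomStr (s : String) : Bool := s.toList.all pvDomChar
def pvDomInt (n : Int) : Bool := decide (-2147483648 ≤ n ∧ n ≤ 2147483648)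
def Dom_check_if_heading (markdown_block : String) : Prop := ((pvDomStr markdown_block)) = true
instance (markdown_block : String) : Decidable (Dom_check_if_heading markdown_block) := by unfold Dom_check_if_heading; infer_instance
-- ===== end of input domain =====

-- B counts the leading hash characters in one scan and checks count/next char directly,
-- instead of A's loop growing a prefix string and re-running startswith (objective: simpler).

-- ===== PORT A =====
-- the for-loop over range(1,7) with break: fuel list = the range, start = the growing '#' prefix
def pvALoop (cs : List Char) (fuel : List Int) (start : List Char) : Bool :=
  match fuel with
  | [] => false                                -- loop ran out: is_heading stays False
  | _ :: rest =>
    if PySem.Chars.startswith cs (start ++ [' ']) then true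
    else if PySem.Chars.startswith cs (start ++ ['#']) then pvALoop cs rest (start ++ ['#'])
    else false

def check_if_heading (markdown_block : String) : Bool :=
  if PySem.Chars.startswith markdown_block.toList ['#'] then
    pvALoop markdown_block.toList (PySem.List.pyRange 1 7 1) ['#']
  else false

-- ===== PORT B =====
-- the counting for-loop of Source B (break at the first non-'#')
def pvHashCount : List Char → Nat
  | [] => 0
  | c :: rest => if c = '#' then pvHashCount rest + 1 else 0

def check_if_heading_alt (markdown_block : String) : Bool :=
  let count := pvHashCount markdown_block.toList
  decide (1 ≤ count ∧ count ≤ 6) &&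
    (PySem.List.slice markdown_block.toList (some (count : Int)) (some ((count : Int) + 1)) == [' '])

-- ===== PRECONDITION & SPEC =====
def Spec_check_if_heading (markdown_block : String) (out : Bool) : Prop := out = check_if_heading_alt markdown_block
instance (markdown_block : String) (out : Bool) : Decidable (Spec_check_if_heading markdown_block out) := by unfold Spec_check_if_heading; infer_instance

-- ===== CLAIM (what is proved, stated in full; the proofs are below) =====
def Claim_equal_check_if_heading : Prop := ∀ (markdown_block : String), Dom_check_if_heading markdown_block → Spec_check_if_heading markdown_block (check_if_heading markdown_block)

-- ===== LEMMAS AND PROOFS =====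

lemma pvALoop_eq (fuel : List Int) : ∀ (j : ℕ) (t : List Char),
    pvALoop (List.replicate j '#' ++ t) fuel (List.replicate j '#')
      = decide (pvHashCount t < fuel.length ∧ (t.drop (pvHashCount t)).take 1 = [' ']) := by
  induction fuel with
  | nil => intro j t; simp [pvALoop]
  | cons f rest ih =>
    intro j t
    rw [pvALoop]
    rw [show PySem.Chars.startswith (List.replicate j '#' ++ t) (List.replicate j '#' ++ [' '])
          = decide ([' '] <+: t) by
        rw [Bool.eq_iff_iff]; simp [PySem.Chars.startswith_iff, List.prefix_append_right_inj]]
    rw [show PySem.Chars.startswith (List.replicate j '#' ++ t) (List.replicate j '#' ++ ['#'])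
          = decide (['#'] <+: t) by
        rw [Bool.eq_iff_iff]; simp [PySem.Chars.startswith_iff, List.prefix_append_right_inj]]
    match t with
    | [] => simp [pvHashCount]
    | c :: t' =>
      by_cases hsp : c = ' '
      · subst hsp
        simp [pvHashCount, List.cons_prefix_cons]
      · by_cases hh : c = '#'
        · subst hh
          have e1 : decide ([' '] <+: '#' :: t') = false := by
            simp [List.cons_prefix_cons]
          have e2 : decide (['#'] <+: '#' :: t') = true := by
            simp [List.cons_prefix_cons]
          have h1 : List.replicate j '#' ++ ['#'] = List.replicate (j + 1) '#' := by
            simp [List.replicate_succ']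
          have h2 : List.replicate j '#' ++ '#' :: t' = List.replicate (j + 1) '#' ++ t' := by
            simp [List.replicate_succ', List.append_assoc]
          rw [e1, e2]
          simp only [Bool.false_eq_true, if_false, if_true, h1, h2, ih (j + 1) t']
          rw [Bool.eq_iff_iff]
          simp only [decide_eq_true_eq, pvHashCount, if_true, List.drop_succ_cons,
            List.length_cons]
          constructor
          · rintro ⟨ha, hb⟩; exact ⟨by omega, hb⟩
          · rintro ⟨ha, hb⟩; exact ⟨by omega, hb⟩
        · have e1 : decide ([' '] <+: c :: t') = false := by
            simp only [List.cons_prefix_cons, decide_eq_false_iff_not]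
            rintro ⟨h, -⟩; exact hsp h.symm
          have e2 : decide (['#'] <+: c :: t') = false := by
            simp only [List.cons_prefix_cons, decide_eq_false_iff_not]
            rintro ⟨h, -⟩; exact hh h.symm
          rw [e1, e2]
          simp [pvHashCount, hh, hsp]

-- ===== VERDICT (by name: the statement is the Claim_ definition above) =====
theorem check_if_heading_spec : Claim_equal_check_if_heading := by
  intro s _
  unfold Spec_check_if_heading check_if_heading check_if_heading_alt
  by_cases h : PySem.Chars.startswith s.toList ['#'] = true
  · rw [if_pos h]
    rw [PySem.Chars.startswith_iff] at h
    obtain ⟨t, ht⟩ := h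
    have hcs : s.toList = List.replicate 1 '#' ++ t := by simp [← ht]
    rw [hcs]
    have hlen : (PySem.List.pyRange 1 7 1).length = 6 := by decide
    have hloop := pvALoop_eq (PySem.List.pyRange 1 7 1) 1 t
    rw [List.replicate_one] at hloop ⊢
    rw [hloop, hlen]
    have hcount : pvHashCount ('#' :: t) = pvHashCount t + 1 := by simp [pvHashCount]
    rw [Bool.eq_iff_iff]
    simp only [List.singleton_append, hcount, Bool.and_eq_true, decide_eq_true_eq, beq_iff_eq]
    rw [show ((pvHashCount t + 1 : ℕ) : ℤ) + 1 = ((pvHashCount t + 1 : ℕ) : ℤ) + ((1 : ℕ) : ℤ)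
          from by norm_num, PySem.List.slice_natCast_add]
    simp only [List.drop_succ_cons]
    constructor
    · rintro ⟨h1, h2⟩; exact ⟨⟨by omega, by omega⟩, h2⟩
    · rintro ⟨⟨h0, h1⟩, h2⟩; exact ⟨by omega, h2⟩
  · rw [if_neg h]
    have h0 : pvHashCount s.toList = 0 := by
      match hm : s.toList with
      | [] => rfl
      | c :: t =>
        have hc : c ≠ '#' := by
          intro hc
          apply h
          rw [PySem.Chars.startswith_iff, hm, hc]
          exact ⟨t, rfl⟩
        simp [pvHashCount, hc]
    simp [h0]
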